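-- pv_equiv track=rewrite | github.com/adamr-05/alpha-recrafted-chunk-renderer | chunk-renderer.py | get_top_view_blocks
-- ===== SOURCE A (Python) =====
-- def get_block_id(blocks, x, y, z, height):
--     return blocks[y + z * height + x * height * 16]
--
-- def get_top_view_blocks(blocks, x, z, height, skipTextures, transpTextures):
--     transpBlocks = []
--     waterDepth = 0
--     for y in range(height - 1, -1, -1):
--         block_id = get_block_id(blocks, x, y, z, height)
--         if block_id == 0 or block_id in skipTextures:
--             continue
--         if block_id == 8 or block_id == 9:
--             waterDepth += 1
--             continue
--         if block_id in transpTextures: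
--             if waterDepth == 0:
--                 transpBlocks.append(block_id)
--             continue
--         solidBlock = block_id
--         elevation = y
--         return elevation, solidBlock, transpBlocks, waterDepth
--     return 0, 0, [], 0
-- ===== SOURCE B (Python) =====
-- def _find_top_solid(blocks, x, z, height, skipTextures, transpTextures):
--     # first pass: top-down, return (elevation, block id) of the first solid block
--     for y in range(height - 1, -1, -1):
--         b = blocks[y + z * height + x * height * 16]
--         if b == 0 or b in skipTextures or b == 8 or b == 9 or b in transpTextures:
--             continue
--         return y, b
--     return None
--
-- def get_top_view_blocks(blocks, x, z, height, skipTextures, transpTextures):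
--     found = _find_top_solid(blocks, x, z, height, skipTextures, transpTextures)
--     if found is None:
--         return 0, 0, [], 0
--     elevation, solidBlock = found
--     # second pass: classify only the blocks strictly above the solid one
--     transpBlocks = []
--     waterDepth = 0
--     for y in range(height - 1, -1, -1):
--         if y == elevation:
--             break
--         b = blocks[y + z * height + x * height * 16]
--         if b == 0 or b in skipTextures:
--             continue
--         elif b == 8 or b == 9:
--             waterDepth += 1
--         elif b in transpTextures and waterDepth == 0:
--             transpBlocks.append(b)
--     return elevation, solidBlock, transpBlocks, waterDepth
-- ===== Notes on version B (the rewrite author's own statement) =====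
-- stated objective: alternative
-- what changed: Replaces A's single accumulator-carrying scan with early return by two passes: first find the top solid block's (elevation, id), then re-scan only the blocks above it to count water and collect transparent blocks; this drops the accumulated state A throws away when no solid block exists.
import Mathlib
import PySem

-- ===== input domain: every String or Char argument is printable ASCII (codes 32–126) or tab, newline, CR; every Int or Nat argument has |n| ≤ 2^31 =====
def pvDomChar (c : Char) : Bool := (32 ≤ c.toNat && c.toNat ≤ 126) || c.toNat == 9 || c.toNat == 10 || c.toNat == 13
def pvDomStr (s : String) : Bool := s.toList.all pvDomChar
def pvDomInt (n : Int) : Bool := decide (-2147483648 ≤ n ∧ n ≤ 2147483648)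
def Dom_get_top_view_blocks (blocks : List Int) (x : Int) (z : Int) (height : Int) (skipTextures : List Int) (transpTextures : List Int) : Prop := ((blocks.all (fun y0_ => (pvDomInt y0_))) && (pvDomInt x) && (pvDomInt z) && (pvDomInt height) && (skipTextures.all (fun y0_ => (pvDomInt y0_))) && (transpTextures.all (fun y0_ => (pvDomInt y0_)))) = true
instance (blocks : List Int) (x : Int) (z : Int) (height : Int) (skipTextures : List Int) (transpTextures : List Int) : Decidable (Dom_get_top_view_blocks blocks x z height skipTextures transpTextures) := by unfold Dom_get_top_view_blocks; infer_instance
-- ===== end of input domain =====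

-- B replaces A's single accumulator-carrying scan by a find-the-top-solid pass followed by a
-- recount pass over the blocks above it (objective: alternative decomposition, same cost).

-- ===== PORT A =====
-- blocks[y + z*height + x*height*16]; none models Python's IndexError (excluded by Pre_)
def pvBlockAt (blocks : List Int) (x : Int) (z : Int) (height : Int) (y : Int) : Option Int :=
  PySem.List.pyGet? blocks (y + z * height + x * height * 16)

-- A's loop: one top-down scan carrying transpBlocks and waterDepth, early return at the first solid
def pvLoopA (blocks : List Int) (x : Int) (z : Int) (height : Int) (skipTextures : List Int) (transpTextures : List Int) : List Int → List Int → Int → Int × Int × List Int × Int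
  | [], _tb, _wd => (0, 0, [], 0)
  | y :: ys, tb, wd =>
    match pvBlockAt blocks x z height y with
    | none => (0, 0, [], 0)   -- IndexError in Python; unreachable under Pre_
    | some b =>
      if b == 0 || skipTextures.contains b then
        pvLoopA blocks x z height skipTextures transpTextures ys tb wd
      else if b == 8 || b == 9 then
        pvLoopA blocks x z height skipTextures transpTextures ys tb (wd + 1)
      else if transpTextures.contains b then
        pvLoopA blocks x z height skipTextures transpTextures ys (if wd == 0 then tb ++ [b] else tb) wd
      else
        (y, b, tb, wd)

def get_top_view_blocks (blocks : List Int) (x : Int) (z : Int) (height : Int) (skipTextures : List Int) (transpTextures : List Int) : Int × Int × List Int × Int :=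
  pvLoopA blocks x z height skipTextures transpTextures (PySem.List.pyRange (height - 1) (-1) (-1)) [] 0

-- ===== PORT B =====
-- pass 1: first solid block (elevation, id), top-down
def pvFindTopSolid (blocks : List Int) (x : Int) (z : Int) (height : Int) (skipTextures : List Int) (transpTextures : List Int) : List Int → Option (Int × Int)
  | [] => none
  | y :: ys =>
    match pvBlockAt blocks x z height y with
    | none => none   -- IndexError in Python; unreachable under Pre_
    | some b =>
      if b == 0 || skipTextures.contains b || b == 8 || b == 9 || transpTextures.contains b then
        pvFindTopSolid blocks x z height skipTextures transpTextures ys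
      else
        some (y, b)

-- pass 2: count water / collect transparent blocks, stopping at the solid elevation
def pvPass2 (blocks : List Int) (x : Int) (z : Int) (height : Int) (skipTextures : List Int) (transpTextures : List Int) (elevation : Int) : List Int → List Int → Int → List Int × Int
  | [], tb, wd => (tb, wd)
  | y :: ys, tb, wd =>
    if y == elevation then (tb, wd)
    else
      match pvBlockAt blocks x z height y with
      | none => pvPass2 blocks x z height skipTextures transpTextures elevation ys tb wd   -- unreachable: pass 1 read this index
      | some b =>
        if b == 0 || skipTextures.contains b then
          pvPass2 blocks x z height skipTextures transpTextures elevation ys tb wd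
        else if b == 8 || b == 9 then
          pvPass2 blocks x z height skipTextures transpTextures elevation ys tb (wd + 1)
        else if transpTextures.contains b && wd == 0 then
          pvPass2 blocks x z height skipTextures transpTextures elevation ys (tb ++ [b]) wd
        else
          pvPass2 blocks x z height skipTextures transpTextures elevation ys tb wd

def get_top_view_blocks_alt (blocks : List Int) (x : Int) (z : Int) (height : Int) (skipTextures : List Int) (transpTextures : List Int) : Int × Int × List Int × Int :=
  match pvFindTopSolid blocks x z height skipTextures transpTextures (PySem.List.pyRange (height - 1) (-1) (-1)) with
  | none => (0, 0, [], 0)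
  | some (elevation, solidBlock) =>
    let p := pvPass2 blocks x z height skipTextures transpTextures elevation (PySem.List.pyRange (height - 1) (-1) (-1)) [] 0
    (elevation, solidBlock, p.1, p.2)

-- ===== PRECONDITION & SPEC =====
-- a block id that A's scan treats as solid (triggers the early return)
def pvSolid (skipTextures transpTextures : List Int) (b : Int) : Bool :=
  !(b == 0 || skipTextures.contains b || b == 8 || b == 9 || transpTextures.contains b)

-- Pre_ is exactly the inputs on which Python A RETURNS (no IndexError): either the loop is empty,
-- or every scanned index fits (top index < len and base ≥ -len), or, when the column runs off the
-- low end, some y whose index is still valid (y ≥ -len - base) holds a solid block, so A returns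
-- early before reaching an invalid index.
def Pre_get_top_view_blocks (blocks : List Int) (x : Int) (z : Int) (height : Int) (skipTextures : List Int) (transpTextures : List Int) : Prop :=
  height ≤ 0 ∨
  (height - 1 + z * height + x * height * 16 < blocks.length ∧
    (-(blocks.length : Int) ≤ z * height + x * height * 16 ∨
     ∃ y ∈ PySem.List.pyRange (height - 1) (-(blocks.length : Int) - (z * height + x * height * 16) - 1) (-1),
       ((pvBlockAt blocks x z height y).any (pvSolid skipTextures transpTextures)) = true))
instance (blocks : List Int) (x : Int) (z : Int) (height : Int) (skipTextures : List Int) (transpTextures : List Int) : Decidable (Pre_get_top_view_blocks blocks x z height skipTextures transpTextures) := by unfold Pre_get_top_view_blocks; infer_instance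
def pvWitness_get_top_view_blocks : List Int × Int × Int × Int × List Int × List Int := ([0, 1], 0, 0, 2, [], [])

def Spec_get_top_view_blocks (blocks : List Int) (x : Int) (z : Int) (height : Int) (skipTextures : List Int) (transpTextures : List Int) (out : Int × Int × List Int × Int) : Prop := out = get_top_view_blocks_alt blocks x z height skipTextures transpTextures
instance (blocks : List Int) (x : Int) (z : Int) (height : Int) (skipTextures : List Int) (transpTextures : List Int) (out : Int × Int × List Int × Int) : Decidable (Spec_get_top_view_blocks blocks x z height skipTextures transpTextures out) := by unfold Spec_get_top_view_blocks; infer_instance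

-- ===== CLAIM (what is proved, stated in full; the proofs are below) =====
def Claim_equal_get_top_view_blocks : Prop := ∀ (blocks : List Int) (x : Int) (z : Int) (height : Int) (skipTextures : List Int) (transpTextures : List Int), Dom_get_top_view_blocks blocks x z height skipTextures transpTextures → Pre_get_top_view_blocks blocks x z height skipTextures transpTextures → Spec_get_top_view_blocks blocks x z height skipTextures transpTextures (get_top_view_blocks blocks x z height skipTextures transpTextures)

-- ===== LEMMAS AND PROOFS =====

-- what pass 1 found: the block at elevation e is s, and s is solid (fails the skip test)
lemma pvFindTopSolid_sound (blocks : List Int) (x z height : Int) (skipTextures transpTextures : List Int) :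
    ∀ ys e s, pvFindTopSolid blocks x z height skipTextures transpTextures ys = some (e, s) →
      pvBlockAt blocks x z height e = some s ∧
      (s == 0 || skipTextures.contains s || s == 8 || s == 9 || transpTextures.contains s) = false := by
  intro ys
  induction ys with
  | nil => intro e s h; simp [pvFindTopSolid] at h
  | cons y ys ih =>
    intro e s h
    unfold pvFindTopSolid at h
    cases hb : pvBlockAt blocks x z height y with
    | none => simp [hb] at h
    | some b =>
      simp only [hb] at h
      by_cases hc : (b == 0 || skipTextures.contains b || b == 8 || b == 9 || transpTextures.contains b) = true
      · rw [if_pos hc] at h; exact ih e s h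
      · rw [if_neg hc] at h
        have h' : y = e ∧ b = s := by simpa using h
        obtain ⟨he, hs⟩ := h'
        subst he; subst hs
        exact ⟨hb, by simpa using hc⟩

-- if pass 1 found (e, s) in ys, a scanned y whose block is non-solid cannot equal e
lemma pvNe_of_found (blocks : List Int) (x z height : Int) (skipTextures transpTextures : List Int)
    (ys : List Int) (e s y b : Int)
    (hf : pvFindTopSolid blocks x z height skipTextures transpTextures ys = some (e, s))
    (hb : pvBlockAt blocks x z height y = some b)
    (hc : (b == 0 || skipTextures.contains b || b == 8 || b == 9 || transpTextures.contains b) = true) :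
    (y == e) = false := by
  rcases pvFindTopSolid_sound blocks x z height skipTextures transpTextures ys e s hf with ⟨h1, h2⟩
  cases hyeq : (y == e) with
  | false => rfl
  | true =>
    have hye : y = e := by simpa using hyeq
    subst hye
    rw [hb] at h1
    injection h1 with h1'
    subst h1'
    rw [hc] at h2
    exact h2

-- key invariant: A's loop equals B's find-then-recount on an arbitrary y-list and accumulators
lemma pvLoopA_eq (blocks : List Int) (x z height : Int) (skipTextures transpTextures : List Int) :
    ∀ ys tb wd,
      pvLoopA blocks x z height skipTextures transpTextures ys tb wd =
        match pvFindTopSolid blocks x z height skipTextures transpTextures ys with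
        | none => (0, 0, [], 0)
        | some (e, s) =>
          let p := pvPass2 blocks x z height skipTextures transpTextures e ys tb wd
          (e, s, p.1, p.2) := by
  intro ys
  induction ys with
  | nil => intro tb wd; simp [pvLoopA, pvFindTopSolid]
  | cons y ys ih =>
    intro tb wd
    cases hb : pvBlockAt blocks x z height y with
    | none => simp [pvLoopA, pvFindTopSolid, hb]
    | some b =>
      by_cases h0 : (b == 0 || skipTextures.contains b) = true
      · have hc : (b == 0 || skipTextures.contains b || b == 8 || b == 9 || transpTextures.contains b) = true := by
          simp at h0 ⊢; tauto
        have hA : pvLoopA blocks x z height skipTextures transpTextures (y :: ys) tb wd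
            = pvLoopA blocks x z height skipTextures transpTextures ys tb wd := by
          simp only [pvLoopA, hb, h0, if_true]
        have hF : pvFindTopSolid blocks x z height skipTextures transpTextures (y :: ys)
            = pvFindTopSolid blocks x z height skipTextures transpTextures ys := by
          simp only [pvFindTopSolid, hb, hc, if_true]
        rw [hA, ih tb wd, hF]
        cases hf : pvFindTopSolid blocks x z height skipTextures transpTextures ys with
        | none => rfl
        | some es =>
          obtain ⟨e, s⟩ := es
          have hne := pvNe_of_found blocks x z height skipTextures transpTextures ys e s y b hf hb hc
          simp only [pvPass2, hne, Bool.false_eq_true, if_false, hb, h0, if_true]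
      · by_cases h89 : (b == 8 || b == 9) = true
        · have hc : (b == 0 || skipTextures.contains b || b == 8 || b == 9 || transpTextures.contains b) = true := by
            simp at h89 ⊢; tauto
          have hA : pvLoopA blocks x z height skipTextures transpTextures (y :: ys) tb wd
              = pvLoopA blocks x z height skipTextures transpTextures ys tb (wd + 1) := by
            simp only [pvLoopA, hb, h0, Bool.false_eq_true, if_false, h89, if_true]
          have hF : pvFindTopSolid blocks x z height skipTextures transpTextures (y :: ys)
              = pvFindTopSolid blocks x z height skipTextures transpTextures ys := by
            simp only [pvFindTopSolid, hb, hc, if_true]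
          rw [hA, ih tb (wd + 1), hF]
          cases hf : pvFindTopSolid blocks x z height skipTextures transpTextures ys with
          | none => rfl
          | some es =>
            obtain ⟨e, s⟩ := es
            have hne := pvNe_of_found blocks x z height skipTextures transpTextures ys e s y b hf hb hc
            simp only [pvPass2, hne, Bool.false_eq_true, if_false, hb, h0, h89, if_true]
        · by_cases htr : transpTextures.contains b = true
          · have hc : (b == 0 || skipTextures.contains b || b == 8 || b == 9 || transpTextures.contains b) = true := by
              simp at htr ⊢; tauto
            have hA : pvLoopA blocks x z height skipTextures transpTextures (y :: ys) tb wd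
                = pvLoopA blocks x z height skipTextures transpTextures ys (if wd == 0 then tb ++ [b] else tb) wd := by
              simp only [pvLoopA, hb, h0, h89, Bool.false_eq_true, if_false, htr, if_true]
            have hF : pvFindTopSolid blocks x z height skipTextures transpTextures (y :: ys)
                = pvFindTopSolid blocks x z height skipTextures transpTextures ys := by
              simp only [pvFindTopSolid, hb, hc, if_true]
            rw [hA, ih (if wd == 0 then tb ++ [b] else tb) wd, hF]
            cases hf : pvFindTopSolid blocks x z height skipTextures transpTextures ys with
            | none => rfl
            | some es =>
              obtain ⟨e, s⟩ := es
              have hne := pvNe_of_found blocks x z height skipTextures transpTextures ys e s y b hf hb hc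
              by_cases hw : (wd == 0) = true
              · simp only [pvPass2, hne, Bool.false_eq_true, if_false, hb, h0, h89, hw,
                  Bool.and_true, htr, if_true]
              · have hw' : (wd == 0) = false := by simpa using hw
                simp only [pvPass2, hne, Bool.false_eq_true, if_false, hb, h0, h89, hw',
                  Bool.and_false]
          · have hc : (b == 0 || skipTextures.contains b || b == 8 || b == 9 || transpTextures.contains b) = false := by
              simp at h0 h89 htr ⊢; tauto
            have hA : pvLoopA blocks x z height skipTextures transpTextures (y :: ys) tb wd = (y, b, tb, wd) := by
              simp only [pvLoopA, hb, h0, h89, htr, Bool.false_eq_true, if_false]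
            have hF : pvFindTopSolid blocks x z height skipTextures transpTextures (y :: ys) = some (y, b) := by
              simp only [pvFindTopSolid, hb, hc, Bool.false_eq_true, if_false]
            rw [hA, hF]
            simp only [pvPass2, beq_self_eq_true, if_true]

-- ===== VERDICT (by name: the statement is the Claim_ definition above) =====
theorem get_top_view_blocks_spec : Claim_equal_get_top_view_blocks := by
  intro blocks x z height skipTextures transpTextures _dom _pre
  unfold Spec_get_top_view_blocks get_top_view_blocks get_top_view_blocks_alt
  exact pvLoopA_eq blocks x z height skipTextures transpTextures _ [] 0
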